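-- pv_equiv track=rewrite | github.com/joonparkk/Texas-Hold-Em-2022 | ICS 33 Project.py | filePairs
-- ===== SOURCE A (Python) =====
-- from collections import Counter
--
-- values = {'2':1, '3':2, '4':3, '5':4, '6':5, '7':6,'8':7,'9':8,'10':9,'11':10, '12':11, '13': 12, '1':13}
--
-- def filePairs(players):
--     highestPair = (0,0,0)
--     for player, cards in players.items(): #takes the keys and the values of the dictionary of players
--         lstofhigh = [] #stores the cards values
--         for card in cards:
--             lstofhigh.append(card[1:])
--         counter = Counter(lstofhigh) #creates a dictionary with the counts of each number
--         for num, amount in counter.items(): #for the number and its frequency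
--             if amount == 2 and int(values[num]) > int(highestPair[1]): #if theres a pair and it has a higher value than the current value it will return true
--                 highestPair = (player, values[num], num)
--     if highestPair == (0,0,0): #returns 0 if there are no pairs
--         return (2, -1)
--     return (2, int(highestPair[0]))
-- ===== SOURCE B (Python) =====
-- values = {'2':1, '3':2, '4':3, '5':4, '6':5, '7':6,'8':7,'9':8,'10':9,'11':10, '12':11, '13': 12, '1':13}
--
-- def _runs(vals):
--     """Group an already-sorted list into (value, run length) pairs, one per distinct value."""
--     out = []
--     prev = None
--     run = 0
--     for v in vals:
--         if run > 0 and v == prev: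
--             run += 1
--         else:
--             if run > 0:
--                 out.append((prev, run))
--             prev = v
--             run = 1
--     if run > 0:
--         out.append((prev, run))
--     return out
--
-- def filePairs(players):
--     best_player = None
--     best_value = 0
--     for player, cards in players.items():
--         vals = sorted(card[1:] for card in cards)
--         for v, run in _runs(vals):
--             if run == 2:
--                 w = values[v]
--                 if w > best_value:
--                     best_player, best_value = player, w
--     if best_player is None:
--         return (2, -1)
--     return (2, best_player)
-- ===== Notes on version B (the rewrite author's own statement) =====
-- stated objective: alternative
-- what changed: Replaces the per-hand Counter dictionary with sort-then-run-length-scan (one value/run pair per distinct value) and tracks the best player and value directly with an Option player instead of A's zero-triple sentinel.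
import Mathlib
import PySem

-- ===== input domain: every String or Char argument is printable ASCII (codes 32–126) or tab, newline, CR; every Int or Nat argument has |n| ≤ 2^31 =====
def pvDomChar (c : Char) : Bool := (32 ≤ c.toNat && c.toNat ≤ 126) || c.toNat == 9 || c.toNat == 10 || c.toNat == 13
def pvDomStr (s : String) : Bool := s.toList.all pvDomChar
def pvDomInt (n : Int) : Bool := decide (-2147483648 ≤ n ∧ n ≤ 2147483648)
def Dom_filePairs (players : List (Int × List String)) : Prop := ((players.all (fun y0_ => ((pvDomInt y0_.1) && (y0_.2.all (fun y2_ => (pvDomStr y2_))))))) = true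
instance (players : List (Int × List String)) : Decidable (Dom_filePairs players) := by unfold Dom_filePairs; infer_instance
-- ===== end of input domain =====

-- B replaces A's per-hand Counter with sort + run-length scan and an Option-player best tracker (alternative decomposition, same cost class); equal return value proved on Pre_.


-- ===== PORT A =====
-- the module constant `values` (dict literal)
def pvValues : PySem.Dict String Int :=
  PySem.Dict.ofList [("2",1),("3",2),("4",3),("5",4),("6",5),("7",6),("8",7),("9",8),("10",9),("11",10),("12",11),("13",12),("1",13)]

-- card[1:]
def pvSfx (card : String) : String := PySem.Str.slice card (some 1) none

-- A's heterogeneous initial tuple (0,0,0) is ported as (0,0,""): after any update the middle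
-- component is positive, so the final equality test agrees with Python's.
-- values[num] is ported as getD with default 0 — Pre_ excludes the KeyError inputs.
def filePairs (players : List (Int × List String)) : Int × Int :=
  let hp := players.foldl (fun hp pc =>
    let lstofhigh := pc.2.foldl (fun l card => l ++ [pvSfx card]) ([] : List String)
    let counter := PySem.Dict.counter lstofhigh
    counter.items.foldl (fun hp na =>
      if na.2 = 2 ∧ pvValues.getD na.1 0 > hp.2.1 then (pc.1, pvValues.getD na.1 0, na.1) else hp) hp)
    (((0 : Int), (0 : Int), ""))
  if hp = ((0 : Int), (0 : Int), "") then (2, -1) else (2, hp.1)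

-- ===== PORT B =====
-- _runs: prev=None is ported as prev="" guarded by run=0 (prev is only read when run>0)
def pvRuns (vals : List String) : List (String × Int) :=
  let st := vals.foldl (fun (st : List (String × Int) × String × Int) v =>
      if st.2.2 > 0 ∧ v = st.2.1 then (st.1, st.2.1, st.2.2 + 1)
      else ((if st.2.2 > 0 then st.1 ++ [(st.2.1, st.2.2)] else st.1), v, 1))
    ([], "", 0)
  if st.2.2 > 0 then st.1 ++ [(st.2.1, st.2.2)] else st.1

def filePairs_alt (players : List (Int × List String)) : Int × Int :=
  let st := players.foldl (fun (st : Option Int × Int) pc =>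
    let vals := PySem.List.sorted (pc.2.map pvSfx) (fun x => x) false
    (pvRuns vals).foldl (fun st vr =>
      if vr.2 = 2 then
        (let w := pvValues.getD vr.1 0
         if w > st.2 then (some pc.1, w) else st)
      else st) st)
    ((none : Option Int), (0 : Int))
  match st.1 with
  | none => (2, -1)
  | some p => (2, p)

-- ===== PRECONDITION & SPEC =====
def pvValueKeys : List String := ["2","3","4","5","6","7","8","9","10","11","12","13","1"]

-- Pre_ excludes (a) duplicate player keys — Python's dict collapses them, which an association
-- list cannot reproduce — and (b) hands where some card-value suffix occurs exactly twice but is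
-- not a key of the `values` table: there Python A (and B) raise KeyError.
def Pre_filePairs (players : List (Int × List String)) : Prop :=
  (players.map (·.1)).Nodup ∧
  ∀ pc ∈ players, ∀ s ∈ pc.2.map pvSfx, (pc.2.map pvSfx).count s = 2 → s ∈ pvValueKeys
instance (players : List (Int × List String)) : Decidable (Pre_filePairs players) := by
  unfold Pre_filePairs; infer_instance

def pvWitness_filePairs : (List (Int × List String)) := [(1, ["s2", "h2", "d13"]), (2, ["c5", "h5"])]

def Spec_filePairs (players : List (Int × List String)) (out : Int × Int) : Prop := out = filePairs_alt players
instance (players : List (Int × List String)) (out : Int × Int) : Decidable (Spec_filePairs players out) := by unfold Spec_filePairs; infer_instance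

-- ===== CLAIM (what is proved, stated in full; the proofs are below) =====
def Claim_equal_filePairs : Prop := ∀ (players : List (Int × List String)), Dom_filePairs players → Pre_filePairs players → Spec_filePairs players (filePairs players)

-- ===== LEMMAS AND PROOFS =====

-- candidate values of one hand: the looked-up weights of the exactly-twice items
def pvCand (l : List (String × Int)) : List Int :=
  (l.filter (fun na => na.2 == 2)).map (fun na => pvValues.getD na.1 0)

-- A's inner loop: its middle component is the running max of the candidates; it is unchanged or updated to player p with a strictly larger value
theorem pvFoldA (l : List (String × Int)) (p : Int) (hp : Int × Int × String) :
    ((l.foldl (fun hp na =>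
        if na.2 = 2 ∧ pvValues.getD na.1 0 > hp.2.1 then (p, pvValues.getD na.1 0, na.1) else hp) hp).2.1
      = (pvCand l).foldl max hp.2.1)
    ∧ ((l.foldl (fun hp na =>
        if na.2 = 2 ∧ pvValues.getD na.1 0 > hp.2.1 then (p, pvValues.getD na.1 0, na.1) else hp) hp) = hp
       ∨ ((l.foldl (fun hp na =>
        if na.2 = 2 ∧ pvValues.getD na.1 0 > hp.2.1 then (p, pvValues.getD na.1 0, na.1) else hp) hp).1 = p
          ∧ hp.2.1 < (l.foldl (fun hp na =>
        if na.2 = 2 ∧ pvValues.getD na.1 0 > hp.2.1 then (p, pvValues.getD na.1 0, na.1) else hp) hp).2.1)) := by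
  induction l generalizing hp with
  | nil => simp [pvCand]
  | cons na l ih =>
    by_cases h2 : na.2 = 2
    · by_cases hv : pvValues.getD na.1 0 > hp.2.1
      · have H := ih (p, pvValues.getD na.1 0, na.1)
        simp only [List.foldl_cons, if_pos (And.intro h2 hv)]
        refine ⟨?_, ?_⟩
        · rw [H.1]
          simp only [pvCand, List.filter_cons, h2, beq_self_eq_true, if_pos, List.map_cons,
            List.foldl_cons]
          rw [max_eq_right (le_of_lt hv)]
        · rcases H.2 with h | h
          · right; rw [h]; exact ⟨rfl, hv⟩
          · right; exact ⟨h.1, lt_trans hv h.2⟩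
      · have hcond : ¬ (na.2 = 2 ∧ pvValues.getD na.1 0 > hp.2.1) := fun h => hv h.2
        simp only [List.foldl_cons, if_neg hcond]
        have H := ih hp
        refine ⟨?_, H.2⟩
        rw [H.1]
        simp only [pvCand, List.filter_cons, h2, beq_self_eq_true, if_pos, List.map_cons,
          List.foldl_cons]
        rw [max_eq_left (not_lt.mp hv)]
    · have hcond : ¬ (na.2 = 2 ∧ pvValues.getD na.1 0 > hp.2.1) := fun h => h2 h.1
      simp only [List.foldl_cons, if_neg hcond]
      have H := ih hp
      refine ⟨?_, H.2⟩
      rw [H.1]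
      have hb : (na.2 == 2) = false := by simpa using h2
      simp [pvCand, hb]

-- B's inner loop, same shape
theorem pvFoldB (l : List (String × Int)) (p : Int) (st : Option Int × Int) :
    ((l.foldl (fun st vr =>
        if vr.2 = 2 then (let w := pvValues.getD vr.1 0; if w > st.2 then (some p, w) else st) else st) st).2
      = (pvCand l).foldl max st.2)
    ∧ ((l.foldl (fun st vr =>
        if vr.2 = 2 then (let w := pvValues.getD vr.1 0; if w > st.2 then (some p, w) else st) else st) st) = st
       ∨ ((l.foldl (fun st vr =>
        if vr.2 = 2 then (let w := pvValues.getD vr.1 0; if w > st.2 then (some p, w) else st) else st) st).1 = some p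
          ∧ st.2 < (l.foldl (fun st vr =>
        if vr.2 = 2 then (let w := pvValues.getD vr.1 0; if w > st.2 then (some p, w) else st) else st) st).2)) := by
  induction l generalizing st with
  | nil => simp [pvCand]
  | cons na l ih =>
    by_cases h2 : na.2 = 2
    · by_cases hv : pvValues.getD na.1 0 > st.2
      · have H := ih (some p, pvValues.getD na.1 0)
        simp only [List.foldl_cons, if_pos h2, if_pos hv]
        refine ⟨?_, ?_⟩
        · rw [H.1]
          simp only [pvCand, List.filter_cons, h2, beq_self_eq_true, if_pos, List.map_cons,
            List.foldl_cons]
          rw [max_eq_right (le_of_lt hv)]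
        · rcases H.2 with h | h
          · right; rw [h]; exact ⟨rfl, hv⟩
          · right; exact ⟨h.1, lt_trans hv h.2⟩
      · simp only [List.foldl_cons, if_pos h2, if_neg hv]
        have H := ih st
        refine ⟨?_, H.2⟩
        rw [H.1]
        simp only [pvCand, List.filter_cons, h2, beq_self_eq_true, if_pos, List.map_cons,
          List.foldl_cons]
        rw [max_eq_left (not_lt.mp hv)]
    · simp only [List.foldl_cons, if_neg h2]
      have H := ih st
      refine ⟨?_, H.2⟩
      rw [H.1]
      have hb : (na.2 == 2) = false := by simpa using h2
      simp [pvCand, hb]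

-- proof-side names for B's run-length loop body and its flush step
def pvRunStepL (st : List (String × Int) × String × Int) (v : String) :
    List (String × Int) × String × Int :=
  if st.2.2 > 0 ∧ v = st.2.1 then (st.1, st.2.1, st.2.2 + 1)
  else ((if st.2.2 > 0 then st.1 ++ [(st.2.1, st.2.2)] else st.1), v, 1)

def pvFinish (st : List (String × Int) × String × Int) : List (String × Int) :=
  if st.2.2 > 0 then st.1 ++ [(st.2.1, st.2.2)] else st.1

theorem pvRuns_eq (vals : List String) :
    pvRuns vals = pvFinish (vals.foldl pvRunStepL ([], "", 0)) := rfl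

-- the run-length loop from a mid-run state over a sorted tail
theorem pvRunsAux (l : List String) (p : String) (r : Int) (out : List (String × Int))
    (hr : 0 < r) (hle : ∀ x ∈ l, p ≤ x) (hl : l.Pairwise (· ≤ ·)) :
    ∃ d : List String, d.Nodup ∧ p ∉ d ∧ (∀ v, v ∈ d ↔ v ∈ l ∧ v ≠ p) ∧
      pvFinish (l.foldl pvRunStepL (out, p, r))
      = out ++ (p, r + l.count p) :: d.map (fun v => (v, (l.count v : Int))) := by
  induction l generalizing p r out with
  | nil =>
    refine ⟨[], by simp, by simp, by simp, ?_⟩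
    simp [pvFinish, hr]
  | cons x rest ih =>
    rcases List.pairwise_cons.mp hl with ⟨hxle, hrest⟩
    by_cases hx : x = p
    · subst hx
      obtain ⟨d, hnd, hpd, hmem, heq⟩ := ih x (r + 1) out (by omega) hxle hrest
      refine ⟨d, hnd, hpd, ?_, ?_⟩
      · intro v
        rw [hmem v]
        constructor
        · rintro ⟨hv, hvp⟩; exact ⟨List.mem_cons_of_mem _ hv, hvp⟩
        · rintro ⟨hv, hvp⟩
          rcases List.mem_cons.mp hv with h | h
          · exact absurd h hvp
          · exact ⟨h, hvp⟩
      · have hstep : pvRunStepL (out, x, r) x = (out, x, r + 1) := by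
          simp [pvRunStepL, hr]
        rw [List.foldl_cons, hstep, heq]
        congr 1
        congr 1
        · congr 1
          simp only [List.count_cons_self]
          push_cast
          ring
        · apply List.map_congr_left
          intro v hv
          have hvp : v ≠ x := ((hmem v).mp hv).2
          simp [Ne.symm hvp]
    · have hpx : p < x := lt_of_le_of_ne (hle x List.mem_cons_self) (fun h => hx h.symm)
      obtain ⟨d, hnd, hxd, hmem, heq⟩ := ih x 1 (out ++ [(p, r)]) one_pos hxle hrest
      have hpnr : p ∉ rest := fun h => absurd (hxle p h) (not_le.mpr hpx)
      refine ⟨x :: d, List.nodup_cons.mpr ⟨hxd, hnd⟩, ?_, ?_, ?_⟩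
      · intro hpin
        rcases List.mem_cons.mp hpin with h | h
        · exact hx h.symm
        · exact hpnr ((hmem p).mp h).1
      · intro v
        simp only [List.mem_cons]
        constructor
        · rintro (rfl | hv)
          · exact ⟨Or.inl rfl, fun h => hx h⟩
          · obtain ⟨h1, h2⟩ := (hmem v).mp hv
            refine ⟨Or.inr h1, ?_⟩
            rintro rfl
            exact hpnr h1
        · rintro ⟨(rfl | hv), hvp⟩
          · exact Or.inl rfl
          · by_cases hvx : v = x
            · exact Or.inl hvx
            · exact Or.inr ((hmem v).mpr ⟨hv, hvx⟩)
      · have hstep : pvRunStepL (out, p, r) x = (out ++ [(p, r)], x, 1) := by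
          simp [pvRunStepL, hx, hr]
        rw [List.foldl_cons, hstep, heq]
        have hcp : (x :: rest).count p = 0 := by
          rw [List.count_eq_zero]
          intro h
          rcases List.mem_cons.mp h with h' | h'
          · exact hx h'.symm
          · exact hpnr h'
        rw [List.append_assoc]
        simp only [List.singleton_append, List.map_cons, hcp, List.count_cons_self]
        congr 1
        congr 1
        · congr 1
          push_cast
          ring
        congr 1
        · congr 1
          push_cast
          ring
        apply List.map_congr_left
        intro v hv
        have hvx : v ≠ x := fun h => hxd (h ▸ hv)
        simp [Ne.symm hvx]

-- run-length scan of a sorted list: one (value, count) pair per distinct value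
theorem pvRuns_spec (l : List String) (hl : l.Pairwise (· ≤ ·)) :
    ∃ d : List String, d.Nodup ∧ (∀ v, v ∈ d ↔ v ∈ l) ∧
      pvRuns l = d.map (fun v => (v, (l.count v : Int))) := by
  cases l with
  | nil => exact ⟨[], by simp, by simp, by simp [pvRuns]⟩
  | cons x rest =>
    rcases List.pairwise_cons.mp hl with ⟨hxle, hrest⟩
    obtain ⟨d, hnd, hxd, hmem, heq⟩ := pvRunsAux rest x 1 [] one_pos hxle hrest
    refine ⟨x :: d, List.nodup_cons.mpr ⟨hxd, hnd⟩, ?_, ?_⟩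
    · intro v
      simp only [List.mem_cons]
      constructor
      · rintro (rfl | hv)
        · exact Or.inl rfl
        · exact Or.inr ((hmem v).mp hv).1
      · rintro (rfl | hv)
        · exact Or.inl rfl
        · by_cases hvx : v = x
          · exact Or.inl hvx
          · exact Or.inr ((hmem v).mpr ⟨hv, hvx⟩)
    · have hstep : pvRunStepL ([], "", 0) x = ([], x, 1) := by
        simp [pvRunStepL]
      rw [pvRuns_eq, List.foldl_cons, hstep, heq]
      simp only [List.nil_append, List.map_cons, List.count_cons_self]
      congr 1
      · congr 1
        push_cast
        ring
      apply List.map_congr_left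
      intro v hv
      have hvx : v ≠ x := fun h => hxd (h ▸ hv)
      simp [Ne.symm hvx]

-- the invariant tying A's (player, value, num) triple to B's (best_player?, best_value) pair
def pvR (hp : Int × Int × String) (st : Option Int × Int) : Prop :=
  st.2 = hp.2.1 ∧ 0 ≤ hp.2.1 ∧
    ((st.1 = none ∧ hp = ((0 : Int), (0 : Int), "")) ∨ ∃ q, st.1 = some q ∧ hp.1 = q ∧ 0 < hp.2.1)

-- one player's hand preserves the invariant
theorem pvHand (pc : Int × List String) (hp : Int × Int × String) (st : Option Int × Int)
    (h : pvR hp st) :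
    pvR
      ((PySem.Dict.counter (pc.2.foldl (fun l card => l ++ [pvSfx card]) ([] : List String))).items.foldl
        (fun hp na => if na.2 = 2 ∧ pvValues.getD na.1 0 > hp.2.1 then (pc.1, pvValues.getD na.1 0, na.1) else hp) hp)
      ((pvRuns (PySem.List.sorted (pc.2.map pvSfx) (fun x => x) false)).foldl
        (fun st vr => if vr.2 = 2 then (let w := pvValues.getD vr.1 0; if w > st.2 then (some pc.1, w) else st) else st) st) := by
  obtain ⟨h1, h2, h3⟩ := h
  have hfold : pc.2.foldl (fun l card => l ++ [pvSfx card]) ([] : List String) = pc.2.map pvSfx := by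
    simpa using PySem.List.foldl_append_singleton_eq_map (l := pc.2) (f := pvSfx) (acc := [])
  rw [hfold]
  have hA := pvFoldA (PySem.Dict.counter (pc.2.map pvSfx)).items pc.1 hp
  have hB := pvFoldB (pvRuns (PySem.List.sorted (pc.2.map pvSfx) (fun x => x) false)) pc.1 st
  have hlA : (PySem.Dict.counter (pc.2.map pvSfx)).items
      = (PySem.Set.ofList (pc.2.map pvSfx)).map (fun k => (k, ((pc.2.map pvSfx).count k : Int))) :=
    PySem.Dict.items_counter (pc.2.map pvSfx)
  have hpw : (PySem.List.sorted (pc.2.map pvSfx) (fun x => x) false).Pairwise (· ≤ ·) :=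
    PySem.List.sorted_pairwise (pc.2.map pvSfx) (fun x => x)
  obtain ⟨d, hnd, hmem, heq⟩ := pvRuns_spec _ hpw
  have hcount : ∀ v, (PySem.List.sorted (pc.2.map pvSfx) (fun x => x) false).count v
      = (pc.2.map pvSfx).count v :=
    fun v => (PySem.List.sorted_perm (pc.2.map pvSfx) (fun x => x) false).count_eq v
  have hBlist : pvRuns (PySem.List.sorted (pc.2.map pvSfx) (fun x => x) false)
      = d.map (fun v => (v, ((pc.2.map pvSfx).count v : Int))) := by
    rw [heq]
    exact List.map_congr_left (fun v hv => by rw [hcount])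
  have hperm : d.Perm (PySem.Set.ofList (pc.2.map pvSfx)) :=
    (List.perm_ext_iff_of_nodup hnd (PySem.Set.nodup_ofList _)).mpr
      (fun v => by rw [hmem v, PySem.Set.mem_ofList, PySem.List.mem_sorted])
  have hpairs : (pvRuns (PySem.List.sorted (pc.2.map pvSfx) (fun x => x) false)).Perm
      (PySem.Dict.counter (pc.2.map pvSfx)).items := by
    rw [hBlist, hlA]
    exact hperm.map _
  have hcperm := (hpairs.filter (fun na => na.2 == 2)).map (fun na => pvValues.getD na.1 0)
  have hmax : (pvCand (pvRuns (PySem.List.sorted (pc.2.map pvSfx) (fun x => x) false))).foldl max st.2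
      = (pvCand (PySem.Dict.counter (pc.2.map pvSfx)).items).foldl max hp.2.1 := by
    rw [h1]
    exact List.Perm.foldl_op_eq hcperm
  have e1 := hB.1.trans (hmax.trans hA.1.symm)
  refine ⟨e1, ?_, ?_⟩
  · rw [hA.1]
    exact le_trans h2 (PySem.List.le_foldl_max _ _).1
  · rcases hA.2 with hAu | ⟨hA1, hAlt⟩
    · rcases hB.2 with hBu | ⟨hB1, hBlt⟩
      · rw [hAu, hBu]
        exact h3
      · exfalso
        rw [hAu] at e1
        rw [← h1] at e1
        exact absurd (e1 ▸ hBlt) (lt_irrefl _)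
    · rcases hB.2 with hBu | ⟨hB1, hBlt⟩
      · exfalso
        rw [hBu, h1] at e1
        exact absurd (e1 ▸ hAlt) (lt_irrefl _)
      · exact Or.inr ⟨pc.1, hB1, hA1, lt_of_le_of_lt h2 hAlt⟩

-- the whole player loop preserves the invariant
theorem pvMain (players : List (Int × List String)) :
    ∀ (hp : Int × Int × String) (st : Option Int × Int), pvR hp st →
    pvR
      (players.foldl (fun hp pc =>
        let lstofhigh := pc.2.foldl (fun l card => l ++ [pvSfx card]) ([] : List String)
        let counter := PySem.Dict.counter lstofhigh
        counter.items.foldl (fun hp na =>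
          if na.2 = 2 ∧ pvValues.getD na.1 0 > hp.2.1 then (pc.1, pvValues.getD na.1 0, na.1) else hp) hp) hp)
      (players.foldl (fun st pc =>
        let vals := PySem.List.sorted (pc.2.map pvSfx) (fun x => x) false
        (pvRuns vals).foldl (fun st vr =>
          if vr.2 = 2 then (let w := pvValues.getD vr.1 0; if w > st.2 then (some pc.1, w) else st) else st) st) st) := by
  induction players with
  | nil => exact fun hp st h => h
  | cons pc rest ih =>
    intro hp st h
    simp only [List.foldl_cons]
    exact ih _ _ (pvHand pc hp st h)

theorem filePairs_spec : Claim_equal_filePairs := by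
  intro players _ _
  show filePairs players = filePairs_alt players
  simp only [filePairs, filePairs_alt]
  have h := pvMain players ((0 : Int), (0 : Int), "") ((none : Option Int), (0 : Int))
    ⟨rfl, le_refl 0, Or.inl ⟨rfl, rfl⟩⟩
  obtain ⟨e1, e2, h3⟩ := h
  rcases h3 with ⟨hn, hz⟩ | ⟨q, hs, hq, hpos⟩
  · rw [if_pos hz, hn]
  · rw [if_neg (fun he => by rw [he] at hpos; exact absurd hpos (lt_irrefl _)), hs, hq]
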